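-- pv_equiv track=rewrite | github.com/TomaszWs/Codewars | 7kyu/Simple-eviternity-numbers.py | solve
-- ===== SOURCE A (Python) =====
-- from itertools import product
--
-- def solve(a, b):
--     def is_eviternity(s):
--         count_8 = s.count('8')
--         count_5 = s.count('5')
--         count_3 = s.count('3')
--         return count_8 >= count_5 >= count_3
--
--     def generate_eviternity_numbers():
--         eviternity_numbers = set()
--         max_length = len(str(500000))
--         for length in range(1, max_length + 1):
--             for combo in product('853', repeat=length):
--                 num_str = ''.join(combo)
--                 if is_eviternity(num_str):
--                     eviternity_numbers.add(int(num_str))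
--         return sorted(eviternity_numbers)
--     eviternity_numbers = generate_eviternity_numbers()
--     count = sum(1 for num in eviternity_numbers if a <= num < b)
--     return count
-- ===== SOURCE B (Python) =====
-- def solve(a, b):
--     # Generate each eviternity number exactly once: pick an ordered digit-count
--     # triple c8 >= c5 >= c3 (total <= 6, at least one digit) and emit every
--     # arrangement of that multiset of digits recursively, building the int
--     # arithmetically.  No filtering, no dedup needed.
--     nums = []
--
--     def emit(prefix, r8, r5, r3):
--         if r8 == 0 and r5 == 0 and r3 == 0:
--             nums.append(prefix)
--             return
--         if r8 > 0:
--             emit(prefix * 10 + 8, r8 - 1, r5, r3)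
--         if r5 > 0:
--             emit(prefix * 10 + 5, r8, r5 - 1, r3)
--         if r3 > 0:
--             emit(prefix * 10 + 3, r8, r5, r3 - 1)
--
--     for c8 in range(1, 7):
--         for c5 in range(c8 + 1):
--             for c3 in range(c5 + 1):
--                 if c8 + c5 + c3 <= 6:
--                     emit(0, c8, c5, c3)
--
--     nums.sort()
--     return sum(1 for n in nums if a <= n < b)
-- ===== Notes on version B (the rewrite author's own statement) =====
-- stated objective: alternative
-- what changed: Instead of generating all 3^L digit strings for L=1..6 and filtering by the count condition with dedup into a set, B enumerates the ordered digit-count triples (c8>=c5>=c3, 1<=c8+c5+c3<=6) and recursively emits every arrangement of each multiset, building each eviternity number arithmetically exactly once, then sorts and counts in [a,b).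
import Mathlib
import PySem

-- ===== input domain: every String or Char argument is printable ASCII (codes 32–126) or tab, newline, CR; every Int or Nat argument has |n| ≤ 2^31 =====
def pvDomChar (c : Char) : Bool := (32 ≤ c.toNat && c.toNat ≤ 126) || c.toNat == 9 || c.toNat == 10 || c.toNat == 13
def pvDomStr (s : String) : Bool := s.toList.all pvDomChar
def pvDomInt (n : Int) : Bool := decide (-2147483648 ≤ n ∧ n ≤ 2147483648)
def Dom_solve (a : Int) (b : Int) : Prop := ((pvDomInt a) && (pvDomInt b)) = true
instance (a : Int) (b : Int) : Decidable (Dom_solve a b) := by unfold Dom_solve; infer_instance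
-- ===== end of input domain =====

-- B enumerates ordered digit-count triples and emits each eviternity number exactly once
-- (no 3^L generate-and-filter, no dedup): alternative algorithm, same result.


-- ===== PORT A =====
-- product('853', repeat=n): the last position varies fastest
def solveProduct (s : List Char) : Nat → List (List Char)
  | 0 => [[]]
  | n + 1 => s.flatMap (fun c => (solveProduct s n).map (fun rest => c :: rest))

def solveIsEviternity (s : List Char) : Bool :=
  let count8 := PySem.Chars.count s ['8']
  let count5 := PySem.Chars.count s ['5']
  let count3 := PySem.Chars.count s ['3']
  decide (count8 ≥ count5) && decide (count5 ≥ count3)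

-- generate_eviternity_numbers(): set built over all products of lengths 1..6, then sorted
-- (int() on a nonempty digit string cannot fail, hence the .getD 0 on PySem.Int.ofChars?)
def solveEviternityNumbers : List Int :=
  let evs : PySem.Set Int :=
    (PySem.List.pyRange 1 (6 + 1) 1).foldl (fun acc len =>
      (solveProduct ['8', '5', '3'] len.toNat).foldl (fun acc2 combo =>
        if solveIsEviternity combo then
          PySem.Set.add acc2 ((PySem.Int.ofChars? combo).getD 0)
        else acc2) acc) PySem.Set.empty
  PySem.List.sorted evs (fun x => x) false

def solve (a : Int) (b : Int) : Int :=
  solveEviternityNumbers.foldl (fun c num => if a ≤ num ∧ num < b then c + 1 else c) 0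

-- ===== PORT B =====
-- emit(prefix, r8, r5, r3): every arrangement of the remaining digit multiset, appended in order.
-- Fuel = r8 + r5 + r3 makes the recursion structural; fuel 0 is exactly the all-zero base case.
def solveAltEmit : Nat → Int → Nat → Nat → Nat → List Int
  | 0, pfx, _, _, _ => [pfx]
  | f + 1, pfx, r8, r5, r3 =>
      (if r8 > 0 then solveAltEmit f (pfx * 10 + 8) (r8 - 1) r5 r3 else []) ++
      (if r5 > 0 then solveAltEmit f (pfx * 10 + 5) r8 (r5 - 1) r3 else []) ++
      (if r3 > 0 then solveAltEmit f (pfx * 10 + 3) r8 r5 (r3 - 1) else [])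

def solveAltNums : List Int :=
  let nums : List Int :=
    (PySem.List.pyRange 1 7 1).foldl (fun acc c8 =>
      (PySem.List.pyRange 0 (c8 + 1) 1).foldl (fun acc c5 =>
        (PySem.List.pyRange 0 (c5 + 1) 1).foldl (fun acc c3 =>
          if c8 + c5 + c3 ≤ 6 then
            acc ++ solveAltEmit (c8.toNat + c5.toNat + c3.toNat) 0 c8.toNat c5.toNat c3.toNat
          else acc) acc) acc) []
  PySem.List.sorted nums (fun x => x) false

def solve_alt (a : Int) (b : Int) : Int :=
  solveAltNums.foldl (fun c n => if a ≤ n ∧ n < b then c + 1 else c) 0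

-- ===== PRECONDITION & SPEC =====
def Spec_solve (a : Int) (b : Int) (out : Int) : Prop := out = solve_alt a b
instance (a : Int) (b : Int) (out : Int) : Decidable (Spec_solve a b out) := by unfold Spec_solve; infer_instance

-- ===== CLAIM (what is proved, stated in full; the proofs are below) =====
def Claim_equal_solve : Prop := ∀ (a : Int) (b : Int), Dom_solve a b → Spec_solve a b (solve a b)

-- ===== LEMMAS AND PROOFS =====
-- Both programs count over the same sorted list of the 325 eviternity numbers;
-- the two closed-term generators produce the identical list.
set_option maxRecDepth 100000 in
set_option maxHeartbeats 4000000 in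
theorem solveLists_eq : solveEviternityNumbers = solveAltNums := by decide

-- ===== VERDICT (by name: the statement is the Claim_ definition above) =====
theorem solve_spec : Claim_equal_solve := by
  intro a b _
  unfold Spec_solve solve solve_alt
  rw [solveLists_eq]
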